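-- pv_equiv track=rewrite | github.com/omkarchavan1a/python | problems_1_150.py | product_digits_b
-- ===== SOURCE A (Python) =====
-- def product_digits_b(n: int) -> int:
--     n = abs(n)
--     if n == 0:
--         return 0
--     p = 1
--     while n:
--         p *= (n % 10)
--         n //= 10
--     return p
-- ===== SOURCE B (Python) =====
-- def product_digits_b(n: int) -> int:
--     p = 1
--     for c in str(abs(n)):
--         p *= int(c)
--     return p
-- ===== Notes on version B (the rewrite author's own statement) =====
-- stated objective: idiomatic
-- what changed: B multiplies the digits of the decimal string str(abs(n)) in one pass instead of extracting digits arithmetically with modulo and floor division, and needs no special case for zero.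
import Mathlib
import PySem

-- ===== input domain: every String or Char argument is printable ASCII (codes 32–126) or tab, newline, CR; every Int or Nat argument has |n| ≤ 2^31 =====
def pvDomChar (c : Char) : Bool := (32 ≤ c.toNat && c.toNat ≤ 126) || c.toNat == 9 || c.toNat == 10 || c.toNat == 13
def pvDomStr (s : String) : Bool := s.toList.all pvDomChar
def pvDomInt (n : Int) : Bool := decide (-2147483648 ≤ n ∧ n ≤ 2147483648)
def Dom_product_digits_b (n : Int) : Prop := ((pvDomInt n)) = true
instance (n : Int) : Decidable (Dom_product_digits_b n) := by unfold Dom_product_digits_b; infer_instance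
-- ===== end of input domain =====

-- B multiplies the digits of the decimal string str(abs(n)) in one pass instead of arithmetic digit extraction (idiomatic, same cost).

-- ===== PORT A =====
-- the while loop of A; after `n = abs(n)` the loop variable is nonnegative, so it lives in Nat
-- (Nat's % and / agree with Python's % and // on nonnegative operands)
def pvLoopA (m : Nat) (p : Int) : Int :=
  if m = 0 then p else pvLoopA (m / 10) (p * ((m % 10 : Nat) : Int))
termination_by m
decreasing_by exact Nat.div_lt_self (Nat.pos_of_ne_zero (by omega)) (by norm_num)

def product_digits_b (n : Int) : Int :=
  let m := n.natAbs          -- n = abs(n)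
  if m = 0 then 0 else pvLoopA m 1

-- ===== PORT B =====
-- for c in str(abs(n)): p *= int(c).  int(c) on a decimal digit character is exactly
-- its code minus 48 ('0'), which is what the accumulator multiplies by.
def product_digits_b_alt (n : Int) : Int :=
  (PySem.Int.toChars (n.natAbs : Int)).foldl (fun p c => p * ((c.toNat : Int) - 48)) 1

-- ===== PRECONDITION & SPEC =====
def Spec_product_digits_b (n : Int) (out : Int) : Prop := out = product_digits_b_alt n
instance (n : Int) (out : Int) : Decidable (Spec_product_digits_b n out) := by unfold Spec_product_digits_b; infer_instance

-- ===== CLAIM (what is proved, stated in full; the proofs are below) =====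
def Claim_equal_product_digits_b : Prop := ∀ (n : Int), Dom_product_digits_b n → Spec_product_digits_b n (product_digits_b n)

-- ===== LEMMAS AND PROOFS =====

/-- Product of the decimal digits of `m` (with `Dd 0 = 0`, the value of the single digit '0'). -/
def Dd (m : Nat) : Int :=
  if m < 10 then (m : Int) else Dd (m / 10) * ((m % 10 : Nat) : Int)
termination_by m
decreasing_by exact Nat.div_lt_self (by omega) (by norm_num)

lemma val_digitChar (d : Nat) (h : d < 10) :
    ((Nat.digitChar d).toNat : Int) - 48 = (d : Int) := by
  interval_cases d <;> decide

lemma pvLoopA_eq (m : Nat) (hm : m ≠ 0) : ∀ p : Int, pvLoopA m p = p * Dd m := by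
  induction m using Nat.strong_induction_on with
  | _ m ih =>
    intro p
    rw [pvLoopA, if_neg hm]
    by_cases h10 : m < 10
    · have h0 : m / 10 = 0 := Nat.div_eq_of_lt h10
      rw [h0, pvLoopA, if_pos rfl, Dd, if_pos h10, Nat.mod_eq_of_lt h10]
    · have hlt : m / 10 < m := Nat.div_lt_self (Nat.pos_of_ne_zero hm) (by norm_num)
      have hne : m / 10 ≠ 0 := by omega
      rw [ih _ hlt hne]
      conv_rhs => rw [Dd, if_neg h10]
      ring

lemma foldl_toDigitsCore (f : Nat) : ∀ (m : Nat) (ds : List Char) (p : Int), m < f →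
    (Nat.toDigitsCore 10 f m ds).foldl (fun p c => p * ((c.toNat : Int) - 48)) p
      = ds.foldl (fun p c => p * ((c.toNat : Int) - 48)) (p * Dd m) := by
  induction f with
  | zero => intro m ds p h; omega
  | succ f ih =>
    intro m ds p h
    rw [Nat.toDigitsCore]
    by_cases h0 : m / 10 = 0
    · have h10 : m < 10 := by omega
      simp only [h0, if_pos]
      rw [List.foldl_cons, val_digitChar _ (Nat.mod_lt _ (by norm_num)),
        Nat.mod_eq_of_lt h10, Dd, if_pos h10]
    · have h10 : ¬ m < 10 := by omega
      simp only [h0, ite_false]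
      have hlt : m / 10 < f := by
        have : m / 10 < m := Nat.div_lt_self (by omega) (by norm_num)
        omega
      rw [ih _ _ _ hlt, List.foldl_cons,
        val_digitChar _ (Nat.mod_lt _ (by norm_num))]
      congr 1
      conv_rhs => rw [Dd, if_neg h10]
      ring

lemma alt_eq_Dd (n : Int) : product_digits_b_alt n = Dd n.natAbs := by
  unfold product_digits_b_alt PySem.Int.toChars
  rw [if_neg (by omega), Nat.toDigits,
    foldl_toDigitsCore _ _ _ _ (by omega), Int.toNat_natCast, List.foldl_nil, one_mul]

-- ===== VERDICT (by name: the statement is the Claim_ definition above) =====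
theorem product_digits_b_spec : Claim_equal_product_digits_b := by
  intro n _
  show product_digits_b n = product_digits_b_alt n
  rw [alt_eq_Dd]
  unfold product_digits_b
  by_cases h : n.natAbs = 0
  · simp only [h, ite_true]
    rw [Dd]; norm_num
  · simp only [h, ite_false]
    rw [pvLoopA_eq _ h, one_mul]
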